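-- pv_equiv track=rewrite | github.com/Moaz-Abed/TARS-AI | src/modules/UI/module_screensaver_terminal.py | _parse_syntax
-- ===== SOURCE A (Python) =====
-- def _parse_syntax(text, base_alpha):
--     keywords = ['def', 'class', 'if', 'else', 'elif', 'for', 'while', 'return', 'import', 'from', 'True', 'False', 'None', 'in', 'not', 'and', 'or']
--     segments = []
--     i = 0
--
--     while i < len(text):
--         if text[i] == '#':
--             color = (100, 150, 100)
--             segments.append((text[i:], color, base_alpha, False))
--             break
--         elif text[i] in ('"', "'"):
--             quote = text[i]
--             end = text.find(quote, i + 1)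
--             if end == -1:
--                 end = len(text)
--             else:
--                 end += 1
--             color = (255, 100, 100)
--             segments.append((text[i:end], color, base_alpha, False))
--             i = end
--         elif text[i].isdigit() or (text[i] == '.' and i + 1 < len(text) and text[i + 1].isdigit()):
--             end = i
--             while end < len(text) and (text[end].isdigit() or text[end] == '.'):
--                 end += 1
--             color = (150, 200, 150)
--             segments.append((text[i:end], color, base_alpha, False))
--             i = end
--         elif text[i].isalpha() or text[i] == '_':
--             end = i
--             while end < len(text) and (text[end].isalnum() or text[end] == '_'):
--                 end += 1
--             word = text[i:end]
--             if word in keywords: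
--                 color = (100, 150, 255)
--                 bold = True
--             else:
--                 color = (0, 200, 200)
--                 bold = False
--             segments.append((word, color, base_alpha, bold))
--             i = end
--         else:
--             color = (0, 200, 200)
--             segments.append((text[i], color, base_alpha, False))
--             i += 1
--
--     return segments
-- ===== SOURCE B (Python) =====
-- import re
--
-- _KEYWORDS = frozenset(['def', 'class', 'if', 'else', 'elif', 'for', 'while', 'return',
--                        'import', 'from', 'True', 'False', 'None', 'in', 'not', 'and', 'or'])
--
-- _TOKEN = re.compile(
--     r"(#.*)"                            # comment: rest of the text
--     r"|(\"[^\"]*\"?|'[^']*'?)"          # string, possibly unterminated-to-end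
--     r"|(\d[\d.]*|\.(?=\d)[\d.]*)"       # number: greedy digits/dots
--     r"|([A-Za-z_]\w*)"                  # identifier / keyword
--     r"|(.)",                            # any other single character
--     re.S | re.A)
--
-- def _parse_syntax(text, base_alpha):
--     out = []
--     for m in _TOKEN.finditer(text):
--         tok = m.group()
--         if m.group(1) is not None:
--             out.append((tok, (100, 150, 100), base_alpha, False))
--         elif m.group(2) is not None:
--             out.append((tok, (255, 100, 100), base_alpha, False))
--         elif m.group(3) is not None:
--             out.append((tok, (150, 200, 150), base_alpha, False))
--         elif m.group(4) is not None:
--             color, bold = ((100, 150, 255), True) if tok in _KEYWORDS else ((0, 200, 200), False)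
--             out.append((tok, color, base_alpha, bold))
--         else:
--             out.append((tok, (0, 200, 200), base_alpha, False))
--     return out
-- ===== Notes on version B (the rewrite author's own statement) =====
-- stated objective: idiomatic
-- what changed: A's manual index-walking while-loop (with str.find and inner character-advance loops) is replaced by a regex tokenizer: one compiled master pattern of ordered alternatives (comment, string, number, identifier, catch-all character) iterated with finditer, picking the color by which group matched.
import Mathlib
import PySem

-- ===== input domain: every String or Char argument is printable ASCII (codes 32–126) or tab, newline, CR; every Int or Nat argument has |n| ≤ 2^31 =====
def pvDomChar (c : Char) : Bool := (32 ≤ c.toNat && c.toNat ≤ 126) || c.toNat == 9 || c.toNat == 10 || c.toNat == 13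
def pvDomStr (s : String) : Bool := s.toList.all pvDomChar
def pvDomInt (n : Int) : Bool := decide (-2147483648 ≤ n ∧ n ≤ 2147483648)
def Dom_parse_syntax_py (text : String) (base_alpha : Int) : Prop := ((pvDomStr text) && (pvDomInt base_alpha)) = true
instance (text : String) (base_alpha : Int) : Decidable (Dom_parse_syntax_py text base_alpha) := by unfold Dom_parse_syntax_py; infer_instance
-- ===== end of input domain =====

-- B replaces A's manual index-walking loop with a regex-style scanner over the character
-- list (ordered alternatives, greedy classes via takeWhile); objective: idiomatic.


-- ===== PORT A =====
-- A's keyword list (a Python list)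
def pvKeywordsA : List String :=
  ["def", "class", "if", "else", "elif", "for", "while", "return",
   "import", "from", "True", "False", "None", "in", "not", "and", "or"]

-- the inner 'while end < len(text) and p(text[end]): end += 1' loops, fuel = len - end
def pvAdvance (cs : List Char) (p : Char → Bool) : Nat → Nat → Nat
  | 0, e => e
  | fuel + 1, e =>
    if h : e < cs.length then
      if p cs[e] then pvAdvance cs p fuel (e + 1) else e
    else e

-- the main 'while i < len(text)' loop of A, fuel = len - i
def pvLoopA (cs : List Char) (ba : Int) : Nat → Nat → List (String × (Int × Int × Int) × Int × Bool)
  | 0, _ => []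
  | fuel + 1, i =>
    if h : i < cs.length then
      let c := cs[i]
      if c = '#' then
        [(String.ofList (cs.drop i), (100, 150, 100), ba, false)]
      else if c = '"' ∨ c = '\'' then
        let f := PySem.Chars.findFrom cs [c] ((i : Int) + 1) none
        let e := if f = -1 then cs.length else f.toNat + 1
        (String.ofList ((cs.drop i).take (e - i)), (255, 100, 100), ba, false) :: pvLoopA cs ba fuel e
      else if PySem.Chars.isdigit c ∨ (c = '.' ∧ i + 1 < cs.length ∧ PySem.Chars.isdigit (cs.getD (i+1) ' ')) then
        let e := pvAdvance cs (fun x => PySem.Chars.isdigit x || x == '.') (cs.length - i) i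
        (String.ofList ((cs.drop i).take (e - i)), (150, 200, 150), ba, false) :: pvLoopA cs ba fuel e
      else if PySem.Chars.isalpha c ∨ c = '_' then
        let e := pvAdvance cs (fun x => PySem.Chars.isalnum x || x == '_') (cs.length - i) i
        let word := String.ofList ((cs.drop i).take (e - i))
        (if pvKeywordsA.contains word then
            (word, (100, 150, 255), ba, true)
          else
            (word, (0, 200, 200), ba, false)) :: pvLoopA cs ba fuel e
      else
        (String.ofList [c], (0, 200, 200), ba, false) :: pvLoopA cs ba fuel (i + 1)
    else []

def parse_syntax_py (text : String) (base_alpha : Int) : List (String × (Int × Int × Int) × Int × Bool) :=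
  pvLoopA text.toList base_alpha text.toList.length 0

-- ===== PORT B =====
-- B's keyword set (a Python frozenset)
def pvKeywordsB : PySem.Set String :=
  PySem.Set.ofList ["def", "class", "if", "else", "elif", "for", "while", "return",
   "import", "from", "True", "False", "None", "in", "not", "and", "or"]

-- regex-style scanner: at each position try the ordered alternatives of the master
-- pattern; a greedy character-class star is List.takeWhile
def pvScanB (ba : Int) : List Char → List (String × (Int × Int × Int) × Int × Bool)
  | [] => []
  | c :: rest =>
    if c = '#' then
      -- alternative 1: '#.*' — the whole remainder
      [(String.ofList (c :: rest), (100, 150, 100), ba, false)]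
    else if c = '"' ∨ c = '\'' then
      -- alternative 2: '"[^"]*"?' — body then optional closing quote
      let body := rest.takeWhile (fun x => !(x == c))
      match h : rest.drop body.length with
      | [] => [(String.ofList (c :: body), (255, 100, 100), ba, false)]
      | _ :: tl =>
        (String.ofList (c :: body ++ [c]), (255, 100, 100), ba, false) :: pvScanB ba tl
    else if PySem.Chars.isdigit c ∨ (c = '.' ∧ (rest.head?.elim false PySem.Chars.isdigit)) then
      -- alternative 3: number
      let ds := rest.takeWhile (fun x => PySem.Chars.isdigit x || x == '.')
      (String.ofList (c :: ds), (150, 200, 150), ba, false) :: pvScanB ba (rest.drop ds.length)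
    else if PySem.Chars.isalpha c ∨ c = '_' then
      -- alternative 4: identifier
      let ws := rest.takeWhile (fun x => PySem.Chars.isalnum x || x == '_')
      let word := String.ofList (c :: ws)
      let cb : (Int × Int × Int) × Bool :=
        if pvKeywordsB.contains word then ((100, 150, 255), true) else ((0, 200, 200), false)
      (word, cb.1, ba, cb.2) :: pvScanB ba (rest.drop ws.length)
    else
      -- alternative 5: any single character
      (String.ofList [c], (0, 200, 200), ba, false) :: pvScanB ba rest
  termination_by s => s.length
  decreasing_by
    · have := congrArg List.length h
      simp at this
      simp
      omega
    · exact Nat.lt_succ_of_le (by simpa using List.length_drop_le _ _)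
    · exact Nat.lt_succ_of_le (by simpa using List.length_drop_le _ _)
    · exact Nat.lt_succ_self _

def parse_syntax_py_alt (text : String) (base_alpha : Int) : List (String × (Int × Int × Int) × Int × Bool) :=
  pvScanB base_alpha text.toList

-- ===== PRECONDITION & SPEC =====
def Spec_parse_syntax_py (text : String) (base_alpha : Int) (out : List (String × (Int × Int × Int) × Int × Bool)) : Prop := out = parse_syntax_py_alt text base_alpha
instance (text : String) (base_alpha : Int) (out : List (String × (Int × Int × Int) × Int × Bool)) : Decidable (Spec_parse_syntax_py text base_alpha out) := by unfold Spec_parse_syntax_py; infer_instance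

-- ===== CLAIM (what is proved, stated in full; the proofs are below) =====
def Claim_equal_parse_syntax_py : Prop := ∀ (text : String) (base_alpha : Int), Dom_parse_syntax_py text base_alpha → Spec_parse_syntax_py text base_alpha (parse_syntax_py text base_alpha)

-- ===== LEMMAS AND PROOFS =====

theorem pvDropTakeWhile (l : List Char) (p : Char → Bool) :
    l.drop (l.takeWhile p).length = l.dropWhile p := by
  nth_rewrite 2 [← List.takeWhile_append_dropWhile (p := p) (l := l)]
  rw [List.drop_left]

-- if q occurs in s, dropWhile (· ≠ q) starts with q
theorem pvDropWhileCons (s : List Char) (q : Char) (hq : q ∈ s) :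
    ∃ t, s.dropWhile (fun x => !(x == q)) = q :: t := by
  set p : Char → Bool := fun x => !(x == q) with hp
  have hdw : s.dropWhile p ≠ [] := by
    intro h
    rw [← List.takeWhile_append_dropWhile (p := p) (l := s), h, List.append_nil] at hq
    have := List.mem_takeWhile_imp hq; simp [hp] at this
  obtain ⟨a, t, hdd⟩ : ∃ a t, s.dropWhile p = a :: t := by
    cases hdd : s.dropWhile p with
    | nil => exact absurd hdd hdw
    | cons a t => exact ⟨a, t, rfl⟩
  have ha : a = q := by
    have h1 : (s.dropWhile p).head? = some a := by rw [hdd]; rfl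
    have h2 := List.head?_eq_some_head (l := s.dropWhile p) hdw
    have h3 := List.head_dropWhile_not p hdw
    rw [h1] at h2
    have : a = (s.dropWhile p).head hdw := Option.some.inj h2
    rw [this]
    have := h3; simp [hp] at this; exact this
  exact ⟨t, by rw [hdd, ha]⟩

-- first-occurrence characterisation of str.find for a single-character needle
theorem pvFindSingle (s : List Char) (q : Char) :
    PySem.Chars.find s [q] =
      if q ∈ s then ((s.takeWhile (fun x => !(x == q))).length : Int) else -1 := by
  by_cases hq : q ∈ s
  · simp only [hq, if_true]
    set p : Char → Bool := fun x => !(x == q) with hp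
    set n := (s.takeWhile p).length with hn
    obtain ⟨t, hdd⟩ := pvDropWhileCons s q hq
    have hdropn : s.drop n = s.dropWhile p := pvDropTakeWhile s p
    have hnpref : [q] <+: s.drop n := by
      rw [hdropn, hdd]; exact ⟨t, rfl⟩
    have hinf : [q] <:+: s := (List.singleton_infix_iff q s).mpr hq
    have hpos : 0 ≤ PySem.Chars.find s [q] := (PySem.Chars.find_nonneg_iff s [q]).mpr hinf
    obtain ⟨hprefm, hmin⟩ := PySem.Chars.find_spec hpos
    set m := (PySem.Chars.find s [q]).toNat with hm
    have hmn : m ≤ n := by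
      by_contra hlt
      exact hmin n (by omega) hnpref
    have hnm : n ≤ m := by
      by_contra hlt
      push_neg at hlt
      have hmlen : m < s.length := by
        rcases hprefm with ⟨t', ht⟩
        have := congrArg List.length ht
        simp at this
        omega
      have hgm : s[m] = q := by
        rcases hprefm with ⟨t', ht⟩
        have h1 : s.drop m = q :: t' := ht.symm
        have h2 := List.drop_eq_getElem_cons hmlen
        rw [h1] at h2
        exact (List.cons.injEq _ _ _ _ ▸ h2).1.symm
      have hmem : s[m] ∈ s.takeWhile p := by
        have htake : s.takeWhile p = s.take n :=
          List.prefix_iff_eq_take.mp (List.takeWhile_prefix p)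
        rw [htake, List.mem_take_iff_getElem]
        exact ⟨m, by omega, by simp⟩
      have := List.mem_takeWhile_imp hmem
      simp [hp, hgm] at this
    omega
  · simp only [hq, if_false]
    rw [PySem.Chars.find_eq_neg_one_iff, List.singleton_infix_iff]
    exact hq

-- the inner advance loop is takeWhile
theorem pvAdv (cs : List Char) (p : Char → Bool) :
    ∀ fuel e, cs.length - e ≤ fuel →
      pvAdvance cs p fuel e = e + ((cs.drop e).takeWhile p).length := by
  intro fuel
  induction fuel with
  | zero =>
    intro e hfe
    have : cs.length ≤ e := by omega
    simp [pvAdvance, List.drop_eq_nil_of_le this]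
  | succ n ih =>
    intro e hfe
    by_cases he : e < cs.length
    · have hdrop := List.drop_eq_getElem_cons he
      by_cases hpe : p cs[e]
      · rw [pvAdvance]
        simp only [dif_pos he, if_pos hpe]
        rw [ih (e+1) (by omega), hdrop, List.takeWhile_cons_of_pos hpe]
        simp; omega
      · rw [pvAdvance]
        simp only [dif_pos he, if_neg hpe]
        rw [hdrop, List.takeWhile_cons_of_neg hpe]
        simp
    · rw [pvAdvance]
      simp [dif_neg he, List.drop_eq_nil_of_le (by omega : cs.length ≤ e)]

theorem pvLoopA_stop (cs : List Char) (ba : Int) (fuel i : Nat) (h : ¬ i < cs.length) :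
    pvLoopA cs ba fuel i = [] := by
  cases fuel <;> simp [pvLoopA, h]

theorem pvKeywordsEq : pvKeywordsB = pvKeywordsA := by decide

-- main bridge: A's position-walking loop equals B's suffix scanner
theorem pvBridge (cs : List Char) (ba : Int) :
    ∀ fuel i, i ≤ cs.length → cs.length - i ≤ fuel →
      pvLoopA cs ba fuel i = pvScanB ba (cs.drop i) := by
  intro fuel
  induction fuel with
  | zero =>
    intro i hle hf
    have : cs.length ≤ i := by omega
    simp [pvLoopA_stop cs ba 0 i (by omega), pvScanB, List.drop_eq_nil_of_le this]
  | succ n ih =>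
    intro i hle hf
    by_cases h : i < cs.length
    · have hdrop : cs.drop i = cs[i] :: cs.drop (i+1) := List.drop_eq_getElem_cons h
      rw [hdrop, pvScanB, pvLoopA]
      simp only [dif_pos h]
      by_cases h1 : cs[i] = '#'
      · simp only [if_pos h1, hdrop]
      · simp only [if_neg h1]
        by_cases h2 : cs[i] = '"' ∨ cs[i] = '\''
        · simp only [if_pos h2]
          -- quote branch
          have hi1 : i + 1 ≤ cs.length := by omega
          have hcast : ((i : Int) + 1) = ((i+1 : Nat) : Int) := by push_cast; ring
          rw [hcast, PySem.Chars.findFrom_natCast cs [(cs[i]'h)] (i+1) hi1]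
          simp only [pvFindSingle (cs.drop (i+1)) (cs[i]'h)]
          by_cases hmem : (cs[i]'h) ∈ cs.drop (i+1)
          · -- closing quote exists
            obtain ⟨tl, hdd⟩ := pvDropWhileCons (cs.drop (i+1)) (cs[i]'h) hmem
            set body := (cs.drop (i+1)).takeWhile (fun x => !(x == (cs[i]'h))) with hbody
            have hdb : (cs.drop (i+1)).drop body.length = (cs[i]'h) :: tl := by
              rw [hbody, pvDropTakeWhile, hdd]
            have hblen : body.length + 1 ≤ (cs.drop (i+1)).length := by
              by_contra hc
              push_neg at hc
              have hnil : (cs.drop (i+1)).drop body.length = [] :=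
                List.drop_eq_nil_of_le (by omega)
              rw [hdb] at hnil
              cases hnil
            have hrlen : (cs.drop (i+1)).length = cs.length - (i+1) := by simp
            simp only [hmem, if_true]
            simp only [if_neg (show ¬ ((body.length : Int) = -1) by omega)]
            simp only [if_neg (show ¬ (((i+1:Nat) : Int) + (body.length : Int) = -1) by push_cast; omega)]
            have htoNat : (((i+1:Nat) : Int) + (body.length : Int)).toNat = i + 1 + body.length := by omega
            rw [htoNat]
            have hsplit : cs.drop (i+1) = body ++ ((cs[i]'h) :: tl) := by
              conv_lhs => rw [← List.takeWhile_append_dropWhile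
                (p := fun x => !(x == (cs[i]'h))) (l := cs.drop (i+1))]
              rw [← hbody, hdd]
            have htake : ((cs[i]'h) :: cs.drop (i+1)).take (i + 1 + body.length + 1 - i)
                = (cs[i]'h) :: (body ++ [(cs[i]'h)]) := by
              rw [show i + 1 + body.length + 1 - i = body.length + 1 + 1 from by omega,
                  List.take_succ_cons]
              congr 1
              rw [hsplit]
              rw [List.take_append]
              rw [List.take_of_length_le (by omega),
                  show body.length + 1 - body.length = 1 from by omega]
              simp
            rw [hdrop]
            simp only [htake]
            have hdropE : cs.drop (i + 1 + body.length + 1) = tl := by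
              have h1 : ((cs.drop (i+1)).drop body.length).tail = tl := by rw [hdb]; rfl
              rw [← h1, List.tail_drop, List.drop_drop]
              congr 1
            rw [ih (i + 1 + body.length + 1) (by omega) (by omega), hdropE]
            split
            · next heq => rw [hdb] at heq; cases heq
            · next a tl' heq =>
              rw [hdb] at heq
              cases heq
              rfl
          · -- unterminated string
            simp only [hmem, if_false, reduceIte]
            have hbody : (cs.drop (i+1)).takeWhile (fun x => !(x == (cs[i]'h))) = cs.drop (i+1) := by
              rw [List.takeWhile_eq_self_iff]
              intro x hx
              simp
              intro hxq
              exact hmem (hxq ▸ hx)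
            have htake : ((cs[i]'h) :: cs.drop (i+1)).take (cs.length - i) = (cs[i]'h) :: cs.drop (i+1) := by
              apply List.take_of_length_le
              simp only [List.length_cons, List.length_drop]
              omega
            rw [hdrop]
            simp only [htake]
            rw [pvLoopA_stop cs ba n cs.length (by omega)]
            split
            · next heq => rw [hbody]
            · next a tl' heq =>
              rw [hbody, List.drop_length] at heq
              cases heq
        · simp only [if_neg h2]
          have hheadD : (cs.drop (i+1)).head? = cs[i+1]? := List.head?_drop
          by_cases h3 : PySem.Chars.isdigit cs[i] = true ∨
              (cs[i] = '.' ∧ i + 1 < cs.length ∧ PySem.Chars.isdigit (cs.getD (i+1) ' ') = true)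
          · -- number branch
            have h3' : PySem.Chars.isdigit cs[i] = true ∨
                (cs[i] = '.' ∧ ((cs.drop (i+1)).head?.elim false PySem.Chars.isdigit) = true) := by
              rcases h3 with h3 | ⟨hdot, hlt, hdig⟩
              · exact Or.inl h3
              · refine Or.inr ⟨hdot, ?_⟩
                rw [hheadD, List.getElem?_eq_getElem hlt]
                rw [List.getD_eq_getElem?_getD, List.getElem?_eq_getElem hlt] at hdig
                simpa using hdig
            simp only [if_pos h3, if_pos h3']
            set p : Char → Bool := fun x => PySem.Chars.isdigit x || x == '.' with hp
            have hpc : p cs[i] = true := by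
              rcases h3 with hd | ⟨hdot, _⟩
              · simp [hp, hd]
              · simp [hp, hdot]
            have hadv := pvAdv cs p (cs.length - i) i (by omega)
            rw [hadv, hdrop, List.takeWhile_cons_of_pos hpc]
            set ds := (cs.drop (i+1)).takeWhile p with hds
            have hdslen : ds.length ≤ (cs.drop (i+1)).length := by
              rw [hds]; exact (List.takeWhile_prefix p).length_le
            have hrlen : (cs.drop (i+1)).length = cs.length - (i+1) := by simp
            have heq1 : i + (ds.length + 1) - i = ds.length + 1 := by omega
            simp only [List.length_cons]
            rw [heq1]
            have htk : (cs[i] :: cs.drop (i+1)).take (ds.length + 1) = cs[i] :: ds := by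
              rw [List.take_succ_cons]
              congr 1
              exact (List.prefix_iff_eq_take.mp (List.takeWhile_prefix p)).symm
            rw [htk]
            have hdropE : cs.drop (i + (ds.length + 1)) = (cs.drop (i+1)).drop ds.length := by
              rw [List.drop_drop]
              congr 1
              omega
            rw [ih (i + (ds.length + 1)) (by omega) (by omega), hdropE]
          · have h3' : ¬ (PySem.Chars.isdigit cs[i] = true ∨
                (cs[i] = '.' ∧ ((cs.drop (i+1)).head?.elim false PySem.Chars.isdigit) = true)) := by
              intro hcon
              rcases hcon with hcon | ⟨hdot, hdig⟩
              · exact h3 (Or.inl hcon)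
              · by_cases hlt : i + 1 < cs.length
                · rw [hheadD, List.getElem?_eq_getElem hlt] at hdig
                  simp at hdig
                  refine h3 (Or.inr ⟨hdot, hlt, ?_⟩)
                  rw [List.getD_eq_getElem?_getD, List.getElem?_eq_getElem hlt]
                  simpa using hdig
                · rw [hheadD, List.getElem?_eq_none (by omega)] at hdig
                  simp at hdig
            simp only [if_neg h3, if_neg h3']
            by_cases h4 : PySem.Chars.isalpha cs[i] = true ∨ cs[i] = '_'
            · -- identifier branch
              simp only [if_pos h4]
              set p : Char → Bool := fun x => PySem.Chars.isalnum x || x == '_' with hp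
              have hadv := pvAdv cs p (cs.length - i) i (by omega)
              have hpc : p cs[i] = true := by
                rcases h4 with h4 | h4
                · simp [hp, PySem.Chars.isalnum, h4]
                · simp [hp, h4]
              rw [hadv, hdrop, List.takeWhile_cons_of_pos hpc]
              set ws := (cs.drop (i+1)).takeWhile p with hws
              have hwslen : ws.length ≤ (cs.drop (i+1)).length := by
                rw [hws]; exact (List.takeWhile_prefix p).length_le
              have hrlen : (cs.drop (i+1)).length = cs.length - (i+1) := by simp
              have heq1 : i + (ws.length + 1) - i = ws.length + 1 := by omega
              simp only [List.length_cons]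
              rw [heq1]
              have htk : (cs[i] :: cs.drop (i+1)).take (ws.length + 1) = cs[i] :: ws := by
                rw [List.take_succ_cons]
                congr 1
                exact (List.prefix_iff_eq_take.mp (List.takeWhile_prefix p)).symm
              rw [htk]
              have hdropE : cs.drop (i + (ws.length + 1)) = (cs.drop (i+1)).drop ws.length := by
                rw [List.drop_drop]
                congr 1
                omega
              rw [ih (i + (ws.length + 1)) (by omega) (by omega), hdropE]
              rw [pvKeywordsEq]
              by_cases hkw : String.ofList (cs[i] :: ws) ∈ pvKeywordsA
              · simp [hkw, PySem.Set.contains]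
              · simp [hkw, PySem.Set.contains]
            · -- single-character branch
              simp only [if_neg h4]
              rw [ih (i+1) (by omega) (by omega)]
    · have hge : cs.length ≤ i := by omega
      rw [pvLoopA_stop cs ba (n+1) i h, List.drop_eq_nil_of_le hge, pvScanB]

-- ===== VERDICT (by name: the statement is the Claim_ definition above) =====
theorem parse_syntax_py_spec : Claim_equal_parse_syntax_py := by
  intro text ba _
  unfold Spec_parse_syntax_py parse_syntax_py parse_syntax_py_alt
  simpa using pvBridge text.toList ba text.toList.length 0 (Nat.zero_le _) (by omega)
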